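-- pv_equiv track=rewrite | github.com/lipafr/crypto-screener-bybit-2.2 | backend/utils/validation.py | sanitize_symbol_list
-- ===== SOURCE A (Python) =====
-- def sanitize_symbol_list(symbols: list[str]) -> list[str]:
--     """
--     Clean and normalize symbol list.
--
--     Removes duplicates, empty strings, and converts to uppercase.
--
--     Args:
--         symbols: List of trading pairs
--
--     Returns:
--         Cleaned list of symbols
--
--     Examples:
--         >>> sanitize_symbol_list(["BTC/USDT", "btc/usdt", "", "ETH/USDT"])
--         ['BTC/USDT', 'ETH/USDT']
--     """
--     if not symbols:
--         return []
--
--     # Convert to uppercase, remove empty, remove duplicates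
--     cleaned = list(set(
--         s.strip().upper()
--         for s in symbols
--         if s and isinstance(s, str) and s.strip()
--     ))
--
--     return sorted(cleaned)
-- ===== SOURCE B (Python) =====
-- def sanitize_symbol_list(symbols: list[str]) -> list[str]:
--     cleaned = sorted(
--         s.strip().upper()
--         for s in symbols
--         if s and isinstance(s, str) and s.strip()
--     )
--     result = []
--     for s in cleaned:
--         if not result or result[-1] != s:
--             result.append(s)
--     return result
-- ===== Notes on version B (the rewrite author's own statement) =====
-- stated objective: idiomatic
-- what changed: B keeps duplicates while cleaning, sorts the cleaned list, and removes duplicates in one linear scan over the sorted list (adjacent-equal skip) instead of building an unordered set and sorting its elements.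
import Mathlib
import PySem

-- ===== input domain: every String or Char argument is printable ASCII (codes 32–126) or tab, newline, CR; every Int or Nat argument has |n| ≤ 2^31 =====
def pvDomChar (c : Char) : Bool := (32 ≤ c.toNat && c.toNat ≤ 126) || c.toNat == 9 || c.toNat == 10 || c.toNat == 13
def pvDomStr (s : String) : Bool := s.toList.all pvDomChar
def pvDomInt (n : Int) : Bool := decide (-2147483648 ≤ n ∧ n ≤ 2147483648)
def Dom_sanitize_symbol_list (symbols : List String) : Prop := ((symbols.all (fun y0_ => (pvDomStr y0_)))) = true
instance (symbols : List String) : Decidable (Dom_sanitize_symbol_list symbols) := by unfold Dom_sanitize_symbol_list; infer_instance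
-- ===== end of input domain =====

-- B builds the cleaned list with duplicates, sorts it, and deduplicates in one linear
-- scan over the sorted list, instead of A's unordered set then sort (objective: idiomatic).

-- ===== PORT A =====
-- the cleaned generator: filter 's and s.strip()' (isinstance is always true here), map strip().upper()
def pvCleaned (symbols : List String) : List String :=
  (symbols.filter (fun s => decide (s ≠ "") && decide (PySem.Str.strip s ≠ ""))).map
    (fun s => PySem.Str.upper (PySem.Str.strip s))

def sanitize_symbol_list (symbols : List String) : List String :=
  if symbols = [] then []
  else
    let cleaned := PySem.Set.ofList (pvCleaned symbols)
    PySem.List.sorted cleaned (fun x => x) false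

-- ===== PORT B =====
def sanitize_symbol_list_alt (symbols : List String) : List String :=
  let cleaned := PySem.List.sorted (pvCleaned symbols) (fun x => x) false
  cleaned.foldl
    (fun result s =>
      if result = [] ∨ result.getLast? ≠ some s then result ++ [s] else result)
    []

-- ===== PRECONDITION & SPEC =====
def Spec_sanitize_symbol_list (symbols : List String) (out : List String) : Prop := out = sanitize_symbol_list_alt symbols
instance (symbols : List String) (out : List String) : Decidable (Spec_sanitize_symbol_list symbols out) := by unfold Spec_sanitize_symbol_list; infer_instance

-- ===== CLAIM (what is proved, stated in full; the proofs are below) =====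
def Claim_equal_sanitize_symbol_list : Prop := ∀ (symbols : List String), Dom_sanitize_symbol_list symbols → Spec_sanitize_symbol_list symbols (sanitize_symbol_list symbols)

-- ===== LEMMAS AND PROOFS =====

-- every element of a strictly increasing list is ≤ its last element
theorem pv_le_getLast : ∀ (l : List String), l.Pairwise (· < ·) →
    ∀ a ∈ l, ∀ m, l.getLast? = some m → a ≤ m := by
  intro l
  induction l with
  | nil => intro _ a ha; cases ha
  | cons x t ih =>
    intro hl a ha m hm
    rcases List.pairwise_cons.mp hl with ⟨hx, ht⟩
    cases t with
    | nil => simp at hm ha; subst hm; simp [ha]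
    | cons y t' =>
      have hm' : (y :: t').getLast? = some m := by
        simpa [List.getLast?_cons_cons] using hm
      rcases List.mem_cons.mp ha with h | h
      · subst h
        exact le_of_lt (lt_of_lt_of_le (hx y (by simp)) (ih ht y (by simp) m hm'))
      · exact ih ht a h m hm'

-- the B fold over a (≤)-sorted list keeps a strictly increasing accumulator and
-- collects exactly the elements of acc and l
theorem pv_fold_inv (l acc : List String)
    (hl : l.Pairwise (· ≤ ·)) (hacc : acc.Pairwise (· < ·))
    (hsep : ∀ b ∈ l, ∀ m, acc.getLast? = some m → m ≤ b) :
    (l.foldl (fun result s =>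
        if result = [] ∨ result.getLast? ≠ some s then result ++ [s] else result) acc).Pairwise (· < ·) ∧
    ∀ x, x ∈ (l.foldl (fun result s =>
        if result = [] ∨ result.getLast? ≠ some s then result ++ [s] else result) acc) ↔ x ∈ acc ∨ x ∈ l := by
  induction l generalizing acc with
  | nil => exact ⟨hacc, by simp⟩
  | cons s t ih =>
    rcases List.pairwise_cons.mp hl with ⟨hs, ht⟩
    by_cases hc : acc = [] ∨ acc.getLast? ≠ some s
    · have hacc' : (acc ++ [s]).Pairwise (· < ·) := by
        refine List.pairwise_append.mpr ⟨hacc, by simp, ?_⟩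
        intro a ha b hb
        rw [show b = s from by simpa using hb]
        rcases hc with hnil | hne
        · subst hnil; cases ha
        · have hne2 : acc ≠ [] := List.ne_nil_of_mem ha
          obtain ⟨m, hm⟩ := Option.isSome_iff_exists.mp (List.getLast?_isSome.mpr hne2)
          have hml : m < s := lt_of_le_of_ne (hsep s (by simp) m hm)
            (by intro h; exact hne (h ▸ hm))
          exact lt_of_le_of_lt (pv_le_getLast acc hacc a ha m hm) hml
      have hsep' : ∀ b ∈ t, ∀ m, (acc ++ [s]).getLast? = some m → m ≤ b := by
        intro b hb m hm
        have : m = s := (by simpa using hm : s = m).symm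
        subst this; exact hs b hb
      have := ih (acc ++ [s]) ht hacc' hsep'
      simp only [List.foldl_cons, if_pos hc]
      refine ⟨this.1, ?_⟩
      intro x; rw [this.2 x]; simp; tauto
    · push Not at hc
      have hlast : acc.getLast? = some s := hc.2
      have hsmem : s ∈ acc := by
        have h1 := List.getLast?_eq_some_getLast hc.1
        rw [h1] at hlast
        have h2 : acc.getLast hc.1 = s := Option.some.injEq .. ▸ hlast
        rw [← h2]; exact List.getLast_mem hc.1
      have hsep' : ∀ b ∈ t, ∀ m, acc.getLast? = some m → m ≤ b := by
        intro b hb m hm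
        rw [hlast] at hm
        cases hm; exact hs b hb
      have := ih acc ht hacc hsep'
      have hncond : ¬(acc = [] ∨ acc.getLast? ≠ some s) := by
        intro h; rcases h with h | h
        · exact hc.1 h
        · exact h hlast
      simp only [List.foldl_cons, if_neg hncond]
      refine ⟨this.1, ?_⟩
      intro x; rw [this.2 x]
      constructor
      · tauto
      · rintro (h | h)
        · exact Or.inl h
        · rcases List.mem_cons.mp h with h' | h'
          · exact Or.inl (by rw [h']; exact hsmem)
          · exact Or.inr h'

-- ===== VERDICT (by name: the statement is the Claim_ definition above) =====
theorem sanitize_symbol_list_spec : Claim_equal_sanitize_symbol_list := by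
  intro symbols _
  unfold Spec_sanitize_symbol_list sanitize_symbol_list sanitize_symbol_list_alt
  have hinv := pv_fold_inv (PySem.List.sorted (pvCleaned symbols) (fun x => x) false) []
    (PySem.List.sorted_pairwise (pvCleaned symbols) (fun x => x)) (by simp) (by simp)
  set r := (PySem.List.sorted (pvCleaned symbols) (fun x => x) false).foldl
    (fun result s => if result = [] ∨ result.getLast? ≠ some s then result ++ [s] else result) [] with hr
  have hnodup : r.Nodup := hinv.1.imp (fun h => ne_of_lt h)
  have hmem : ∀ x, x ∈ r ↔ x ∈ pvCleaned symbols := by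
    intro x
    rw [hinv.2 x]
    simp [PySem.List.mem_sorted]
  by_cases hnil : symbols = []
  · subst hnil
    simp [pvCleaned, PySem.List.sorted] at hr ⊢
    exact hr.symm
  · rw [if_neg hnil]
    refine PySem.List.sorted_eq_of_perm_of_pairwise_lt
      (xs := PySem.Set.ofList (pvCleaned symbols)) (ys := r) (key := fun x => x) ?_ ?_
    · refine (List.perm_ext_iff_of_nodup hnodup (PySem.Set.nodup_ofList _)).mpr ?_
      intro x
      rw [hmem x, PySem.Set.mem_ofList]
    · exact hinv.1
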